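-- pv_equiv track=rewrite | github.com/ajopeytz/adventofcode | 2024/2024-08-2.py | is_antinode
-- ===== SOURCE A (Python) =====
-- def relative_position(x,y,antenna):
--     return int(antenna[0])-x,int(antenna[1])-y,antenna[2]
--
-- def is_antinode(x,y,antennas):
--     for antenna in antennas:
--         other_antennas = antennas.copy()
--         other_antennas.remove(antenna)
--         for other in other_antennas:
--             if other[2] == antenna[2]:
--                 rx,ry,c = relative_position(antenna[0],antenna[1],other)
--                 for i in range(0,50):
--                     if antenna[0]+rx*i == x and antenna[1]+ry*i == y:
--                         return True
--     return False
-- ===== SOURCE B (Python) =====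
-- def _hits(a0, a1, rx, ry, x, y):
--     # solve a0 + rx*i == x, a1 + ry*i == y for an integer i in [0, 50)
--     dx, dy = x - a0, y - a1
--     if rx == 0 and ry == 0:
--         return dx == 0 and dy == 0
--     if rx != 0:
--         if dx % rx != 0:
--             return False
--         i = dx // rx
--         return 0 <= i < 50 and ry * i == dy
--     if dx != 0 or dy % ry != 0:
--         return False
--     i = dy // ry
--     return 0 <= i < 50
--
-- def is_antinode(x, y, antennas):
--     for i, a in enumerate(antennas):
--         for j, o in enumerate(antennas):
--             if i != j and o[2] == a[2] and _hits(a[0], a[1], int(o[0]) - a[0], int(o[1]) - a[1], x, y):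
--                 return True
--     return False
-- ===== Notes on version B (the rewrite author's own statement) =====
-- stated objective: faster
-- what changed: B drops A's innermost i=0..49 scan and instead solves the line equation a+i*r=(x,y) directly with an exact integer divisibility/division check, and replaces A's list copy()+remove() per outer element by enumerate loops that skip the matching index.
import Mathlib
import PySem

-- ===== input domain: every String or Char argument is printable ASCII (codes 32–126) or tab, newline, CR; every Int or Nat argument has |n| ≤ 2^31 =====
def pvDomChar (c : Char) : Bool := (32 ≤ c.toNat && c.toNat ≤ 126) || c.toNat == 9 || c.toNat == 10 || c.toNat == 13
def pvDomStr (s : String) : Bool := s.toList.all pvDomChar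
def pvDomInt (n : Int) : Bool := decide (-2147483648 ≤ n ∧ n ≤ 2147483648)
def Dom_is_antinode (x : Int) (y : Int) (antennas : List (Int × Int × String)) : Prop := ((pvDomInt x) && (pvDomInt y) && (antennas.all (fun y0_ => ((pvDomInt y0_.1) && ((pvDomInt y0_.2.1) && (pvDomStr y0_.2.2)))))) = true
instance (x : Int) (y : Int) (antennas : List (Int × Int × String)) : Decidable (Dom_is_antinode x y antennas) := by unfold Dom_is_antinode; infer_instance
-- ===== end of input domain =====

-- B replaces A's inner i = 0..49 scan by directly solving the line equation with exact
-- integer division, and replaces A's copy/remove by index-skipping loops, removing the 50-step scan and the per-element list copy (objective: faster, constant factor).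

-- ===== PORT A =====
def is_antinode (x : Int) (y : Int) (antennas : List (Int × Int × String)) : Bool :=
  antennas.any fun antenna =>
    ((PySem.List.remove? antennas antenna).getD []).any fun other =>
      other.2.2 == antenna.2.2 &&
        (let rx := other.1 - antenna.1
         let ry := other.2.1 - antenna.2.1
         (PySem.List.pyRange 0 50 1).any fun i =>
           antenna.1 + rx * i == x && antenna.2.1 + ry * i == y)

-- ===== PORT B =====
def hitsB (a0 : Int) (a1 : Int) (rx : Int) (ry : Int) (x : Int) (y : Int) : Bool :=
  let dx := x - a0
  let dy := y - a1
  if rx == 0 && ry == 0 then dx == 0 && dy == 0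
  else if rx != 0 then
    if PySem.Int.mod dx rx != 0 then false
    else
      let i := PySem.Int.floordiv dx rx
      decide (0 ≤ i) && decide (i < 50) && ry * i == dy
  else if dx != 0 || PySem.Int.mod dy ry != 0 then false
  else
    let i := PySem.Int.floordiv dy ry
    decide (0 ≤ i) && decide (i < 50)

def is_antinode_alt (x : Int) (y : Int) (antennas : List (Int × Int × String)) : Bool :=
  (PySem.List.enumerate antennas 0).any fun ia =>
    (PySem.List.enumerate antennas 0).any fun jo =>
      ia.1 != jo.1 && jo.2.2.2 == ia.2.2.2 &&
        hitsB ia.2.1 ia.2.2.1 (jo.2.1 - ia.2.1) (jo.2.2.1 - ia.2.2.1) x y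

-- ===== PRECONDITION & SPEC =====
def Spec_is_antinode (x : Int) (y : Int) (antennas : List (Int × Int × String)) (out : Bool) : Prop := out = is_antinode_alt x y antennas
instance (x : Int) (y : Int) (antennas : List (Int × Int × String)) (out : Bool) : Decidable (Spec_is_antinode x y antennas out) := by unfold Spec_is_antinode; infer_instance

-- ===== CLAIM (what is proved, stated in full; the proofs are below) =====
def Claim_equal_is_antinode : Prop := ∀ (x : Int) (y : Int) (antennas : List (Int × Int × String)), Dom_is_antinode x y antennas → Spec_is_antinode x y antennas (is_antinode x y antennas)

-- ===== LEMMAS AND PROOFS =====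

-- B's closed-form solve agrees with an exhaustive ∃-characterisation of the i = 0..49 hit
theorem hitsB_true_iff (a0 a1 rx ry x y : Int) :
    hitsB a0 a1 rx ry x y = true ↔
      ∃ i : Int, 0 ≤ i ∧ i < 50 ∧ rx * i = x - a0 ∧ ry * i = y - a1 := by
  set dx := x - a0 with hdx
  set dy := y - a1 with hdy
  by_cases hrx : rx = 0
  · by_cases hry : ry = 0
    · subst hrx; subst hry
      simp only [hitsB, ← hdx, ← hdy]
      rw [if_pos (by simp)]
      simp only [Bool.and_eq_true, beq_iff_eq]
      constructor
      · rintro ⟨h1, h2⟩; exact ⟨0, le_refl 0, by omega, by simp [h1], by simp [h2]⟩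
      · rintro ⟨i, _, _, h1, h2⟩; constructor <;> omega
    · subst hrx
      simp only [hitsB, ← hdx, ← hdy]
      have c1 : ((0:Int) == 0 && ry == 0) = false := by simp [hry]
      have c2 : ((0:Int) != 0) = false := by simp
      rw [c1, if_neg (by simp), c2, if_neg (by simp)]
      by_cases hzx : dx = 0
      · by_cases hdvd : ry ∣ dy
        · have hm : PySem.Int.mod dy ry = 0 := (PySem.Int.mod_eq_zero_iff_dvd dy ry).mpr hdvd
          rw [if_neg (by simp [hzx, hm])]
          have hkey : ry * PySem.Int.floordiv dy ry = dy := by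
            have := PySem.Int.floordiv_mul_add_mod dy ry
            rw [hm] at this; linarith [this]
          simp only [Bool.and_eq_true, decide_eq_true_eq]
          constructor
          · rintro ⟨h1, h2⟩
            exact ⟨PySem.Int.floordiv dy ry, h1, h2, by omega, hkey⟩
          · rintro ⟨i, h1, h2, _, hyi⟩
            have : i = PySem.Int.floordiv dy ry := by
              have := hkey
              exact mul_left_cancel₀ hry (by omega)
            subst this; exact ⟨h1, h2⟩
        · have hm : PySem.Int.mod dy ry ≠ 0 := fun h => hdvd ((PySem.Int.mod_eq_zero_iff_dvd dy ry).mp h)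
          rw [if_pos (by simp [hm])]
          simp only [Bool.false_eq_true, false_iff]
          rintro ⟨i, _, _, _, hyi⟩
          exact hdvd ⟨i, hyi.symm⟩
      · rw [if_pos (by simp [hzx])]
        simp only [Bool.false_eq_true, false_iff]
        rintro ⟨i, _, _, hxi, _⟩
        exact hzx (by omega)
  · simp only [hitsB, ← hdx, ← hdy]
    have c1 : (rx == 0 && ry == 0) = false := by simp [hrx]
    have c2 : (rx != 0) = true := by simp [hrx]
    rw [c1, if_neg (by simp), c2, if_pos rfl]
    by_cases hdvd : rx ∣ dx
    · have hm : PySem.Int.mod dx rx = 0 := (PySem.Int.mod_eq_zero_iff_dvd dx rx).mpr hdvd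
      rw [if_neg (by simp [hm])]
      have hkey : rx * PySem.Int.floordiv dx rx = dx := by
        have := PySem.Int.floordiv_mul_add_mod dx rx
        rw [hm] at this; linarith [this]
      simp only [Bool.and_eq_true, decide_eq_true_eq, beq_iff_eq]
      constructor
      · rintro ⟨⟨h1, h2⟩, h3⟩
        exact ⟨PySem.Int.floordiv dx rx, h1, h2, hkey, h3⟩
      · rintro ⟨i, h1, h2, hxi, hyi⟩
        have : i = PySem.Int.floordiv dx rx := mul_left_cancel₀ hrx (by omega)
        subst this; exact ⟨⟨h1, h2⟩, hyi⟩
    · have hm : PySem.Int.mod dx rx ≠ 0 := fun h => hdvd ((PySem.Int.mod_eq_zero_iff_dvd dx rx).mp h)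
      rw [if_pos (by simp [hm])]
      simp only [Bool.false_eq_true, false_iff]
      rintro ⟨i, _, _, hxi, _⟩
      exact hdvd ⟨i, hxi.symm⟩

-- the closed-form solve equals A's i = 0..49 scan
theorem hitsB_eq_scan (a0 a1 rx ry x y : Int) :
    ((PySem.List.pyRange 0 50 1).any fun i =>
      a0 + rx * i == x && a1 + ry * i == y) = hitsB a0 a1 rx ry x y := by
  rw [Bool.eq_iff_iff, List.any_eq_true, hitsB_true_iff]
  constructor
  · rintro ⟨i, hi, hp⟩
    rw [PySem.List.mem_pyRange_one] at hi
    simp only [Bool.and_eq_true, beq_iff_eq] at hp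
    exact ⟨i, hi.1, hi.2, by omega, by omega⟩
  · rintro ⟨i, h1, h2, h3, h4⟩
    refine ⟨i, PySem.List.mem_pyRange_one.mpr ⟨h1, h2⟩, ?_⟩
    simp only [Bool.and_eq_true, beq_iff_eq]
    constructor <;> omega

theorem any_congr_mem' {α : Type} (l : List α) (f g : α → Bool)
    (h : ∀ a ∈ l, f a = g a) : l.any f = l.any g := by
  induction l with
  | nil => rfl
  | cons hd tl ih =>
      simp only [List.any_cons, h hd (by simp)]
      rw [ih fun a ha => h a (by simp [ha])]

theorem any_perm {α : Type} {l l' : List α} (h : l.Perm l') (p : α → Bool) :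
    l.any p = l'.any p := by
  rw [Bool.eq_iff_iff, List.any_eq_true, List.any_eq_true]
  exact ⟨fun ⟨a, ha, hp⟩ => ⟨a, h.mem_iff.mp ha, hp⟩,
         fun ⟨a, ha, hp⟩ => ⟨a, h.mem_iff.mpr ha, hp⟩⟩

theorem perm_cons_eraseIdx' {α : Type} (l : List α) (n : Nat) (h : n < l.length) :
    l.Perm (l[n] :: l.eraseIdx n) := by
  conv_lhs => rw [← List.take_append_drop n l, List.drop_eq_getElem_cons h]
  rw [List.eraseIdx_eq_take_drop_succ]
  exact List.perm_middle

theorem perm_eraseIdx_erase {α : Type} [BEq α] [LawfulBEq α] (l : List α) (n : Nat)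
    (hn : n < l.length) : (l.eraseIdx n).Perm (l.erase l[n]) := by
  have h1 := perm_cons_eraseIdx' l n hn
  have h2 : l.Perm (l[n] :: l.erase l[n]) := List.perm_cons_erase (l.getElem_mem hn)
  exact (List.perm_cons _).mp (h1.symm.trans h2)

theorem any_enumerate_big {α : Type} (l : List α) (s k : Int) (q : α → Bool)
    (hk : k < s) :
    ((PySem.List.enumerate l s).any fun jo => jo.1 != k && q jo.2) = l.any q := by
  induction l generalizing s with
  | nil => rfl
  | cons hd tl ih =>
      rw [PySem.List.enumerate_cons, List.any_cons, List.any_cons, ih (s+1) (by omega)]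
      have : (s != k) = true := by simp; omega
      simp [this]

-- skipping one index while scanning enumerate = scanning the list with that position erased
theorem any_enumerate_skip {α : Type} (l : List α) (s : Int) (n : Nat) (q : α → Bool)
    (hn : n < l.length) :
    ((PySem.List.enumerate l s).any fun jo => jo.1 != (s + n) && q jo.2)
      = (l.eraseIdx n).any q := by
  induction l generalizing s n with
  | nil => simp at hn
  | cons hd tl ih =>
      rw [PySem.List.enumerate_cons, List.any_cons]
      cases n with
      | zero =>
          have h1 : (s != (s + (0:Nat))) = false := by simp
          rw [h1, Bool.false_and, Bool.false_or, List.eraseIdx_zero, List.tail_cons]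
          have : (s : Int) + (0:Nat) < s + 1 := by simp
          exact any_enumerate_big tl (s+1) _ q this
      | succ m =>
          have h1 : (s != (s + ((m+1:Nat)))) = true := by simp; omega
          rw [h1, Bool.true_and, List.eraseIdx_cons_succ, List.any_cons]
          have h2 : (s : Int) + (m+1:Nat) = (s+1) + (m:Nat) := by push_cast; ring
          rw [h2, ih (s+1) m (by simpa using hn)]

theorem any_enumerate_skip0 {α : Type} (l : List α) (n : Nat) (q : α → Bool)
    (hn : n < l.length) :
    ((PySem.List.enumerate l 0).any fun jo => jo.1 != (n : Int) && q jo.2)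
      = (l.eraseIdx n).any q := by
  have := any_enumerate_skip l 0 n q hn
  simpa using this

theorem mem_enumerate_zero {α : Type} (l : List α) (p : Int × α) :
    p ∈ PySem.List.enumerate l 0 ↔ ∃ n : Nat, ∃ h : n < l.length, p = ((n : Int), l[n]) := by
  rw [List.mem_iff_getElem?]
  constructor
  · rintro ⟨k, hk⟩
    rw [PySem.List.getElem?_enumerate] at hk
    cases hl : l[k]? with
    | none => simp [hl] at hk
    | some v =>
        rw [hl] at hk
        simp at hk
        exact ⟨k, (List.getElem?_eq_some_iff.mp hl).1, by
          obtain ⟨hlt, hv⟩ := List.getElem?_eq_some_iff.mp hl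
          simp [← hk, hv]⟩
  · rintro ⟨n, h, rfl⟩
    exact ⟨n, by rw [PySem.List.getElem?_enumerate, List.getElem?_eq_getElem h]; simp⟩

-- B's inner index-skipping pass, for outer element l[n], scans exactly l minus one copy of l[n]
theorem inner_eq (l : List (Int × Int × String)) (x y : Int) (n : Nat) (hn : n < l.length) :
    ((PySem.List.enumerate l 0).any fun jo =>
      (((n : Int), l[n]).1 != jo.1 && jo.2.2.2 == (((n : Int), l[n])).2.2.2 &&
        hitsB (((n : Int), l[n])).2.1 (((n : Int), l[n])).2.2.1
          (jo.2.1 - (((n : Int), l[n])).2.1) (jo.2.2.1 - (((n : Int), l[n])).2.2.1) x y))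
      = (l.erase l[n]).any fun o =>
          o.2.2 == l[n].2.2 &&
            hitsB l[n].1 l[n].2.1 (o.1 - l[n].1) (o.2.1 - l[n].2.1) x y := by
  have hpt : ∀ jo : Int × (Int × Int × String),
      ((((n : Int), l[n]).1 != jo.1 && jo.2.2.2 == (((n : Int), l[n])).2.2.2 &&
        hitsB (((n : Int), l[n])).2.1 (((n : Int), l[n])).2.2.1
          (jo.2.1 - (((n : Int), l[n])).2.1) (jo.2.2.1 - (((n : Int), l[n])).2.2.1) x y))
      = (jo.1 != (n : Int) &&
          (jo.2.2.2 == l[n].2.2 &&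
            hitsB l[n].1 l[n].2.1 (jo.2.1 - l[n].1) (jo.2.2.1 - l[n].2.1) x y)) := by
    intro jo
    simp only [Bool.and_assoc]
    rw [bne_comm]
  rw [any_congr_mem' _ _ _ (fun jo _ => hpt jo),
      any_enumerate_skip0 l n
        (fun o => o.2.2 == l[n].2.2 &&
          hitsB l[n].1 l[n].2.1 (o.1 - l[n].1) (o.2.1 - l[n].2.1) x y) hn,
      any_perm (perm_eraseIdx_erase l n hn)]

-- ===== VERDICT (by name: the statement is the Claim_ definition above) =====
theorem is_antinode_spec : Claim_equal_is_antinode := by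
  intro x y l _
  unfold Spec_is_antinode
  have hA : is_antinode x y l
      = l.any fun a => (l.erase a).any fun o =>
          o.2.2 == a.2.2 && hitsB a.1 a.2.1 (o.1 - a.1) (o.2.1 - a.2.1) x y := by
    simp only [is_antinode, hitsB_eq_scan]
    exact any_congr_mem' _ _ _ fun a ha => by
      rw [PySem.List.remove?_eq_some_erase l a ha, Option.getD_some]
  rw [hA, Bool.eq_iff_iff, List.any_eq_true]
  unfold is_antinode_alt
  rw [List.any_eq_true]
  constructor
  · rintro ⟨a, ha, hpa⟩
    obtain ⟨n, hn, rfl⟩ := List.mem_iff_getElem.mp ha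
    refine ⟨((n : Int), l[n]), (mem_enumerate_zero l _).mpr ⟨n, hn, rfl⟩, ?_⟩
    rw [inner_eq l x y n hn]
    exact hpa
  · rintro ⟨ia, hia, hpia⟩
    obtain ⟨n, hn, rfl⟩ := (mem_enumerate_zero l ia).mp hia
    rw [inner_eq l x y n hn] at hpia
    exact ⟨l[n], l.getElem_mem hn, hpia⟩
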